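-- pv_equiv track=rewrite | github.com/nataliaa7337/curso-ada | 04 - Listas y Diccionarios/jugadores-puntajes.py | obtener_resultado
-- ===== SOURCE A (Python) =====
-- def obtener_resultado(jugadorA, jugadorB, jugadorC, puntajesA, puntajesB, puntajesC):
--     sumaJugadorA = 0
--     sumaJugadorB = 0
--     sumaJugadorC = 0
--     for num in puntajesA:
--         sumaJugadorA = sumaJugadorA + num
--     for num in puntajesB:
--         sumaJugadorB = sumaJugadorB + num
--     for num in puntajesC:
--         sumaJugadorC = sumaJugadorC + num
--
--     if sumaJugadorA > sumaJugadorB and sumaJugadorA > sumaJugadorC: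
--         return 'Gana jugadorA' + jugadorA
--     elif sumaJugadorB > sumaJugadorA and sumaJugadorB > sumaJugadorC:
--         return 'Gana jugadorB' + jugadorB
--     elif sumaJugadorC > sumaJugadorA and sumaJugadorC > sumaJugadorB:
--         return 'Gana jugadorC'
--     else:
--         return 'Empate'
-- ===== SOURCE B (Python) =====
-- def obtener_resultado(jugadorA, jugadorB, jugadorC, puntajesA, puntajesB, puntajesC):
--     pares = [(sum(puntajesA), 'Gana jugadorA' + jugadorA),
--              (sum(puntajesB), 'Gana jugadorB' + jugadorB),
--              (sum(puntajesC), 'Gana jugadorC')]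
--     m = max(t for t, _ in pares)
--     ganadores = [msg for t, msg in pares if t == m]
--     return ganadores[0] if len(ganadores) == 1 else 'Empate'
-- ===== Notes on version B (the rewrite author's own statement) =====
-- stated objective: alternative
-- what changed: Replaces the three accumulator loops and the four-way if/elif comparison chain by sum() plus a max-and-count over a (total, message) table: the winner is the unique total equal to the maximum, otherwise 'Empate'.
import Mathlib
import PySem

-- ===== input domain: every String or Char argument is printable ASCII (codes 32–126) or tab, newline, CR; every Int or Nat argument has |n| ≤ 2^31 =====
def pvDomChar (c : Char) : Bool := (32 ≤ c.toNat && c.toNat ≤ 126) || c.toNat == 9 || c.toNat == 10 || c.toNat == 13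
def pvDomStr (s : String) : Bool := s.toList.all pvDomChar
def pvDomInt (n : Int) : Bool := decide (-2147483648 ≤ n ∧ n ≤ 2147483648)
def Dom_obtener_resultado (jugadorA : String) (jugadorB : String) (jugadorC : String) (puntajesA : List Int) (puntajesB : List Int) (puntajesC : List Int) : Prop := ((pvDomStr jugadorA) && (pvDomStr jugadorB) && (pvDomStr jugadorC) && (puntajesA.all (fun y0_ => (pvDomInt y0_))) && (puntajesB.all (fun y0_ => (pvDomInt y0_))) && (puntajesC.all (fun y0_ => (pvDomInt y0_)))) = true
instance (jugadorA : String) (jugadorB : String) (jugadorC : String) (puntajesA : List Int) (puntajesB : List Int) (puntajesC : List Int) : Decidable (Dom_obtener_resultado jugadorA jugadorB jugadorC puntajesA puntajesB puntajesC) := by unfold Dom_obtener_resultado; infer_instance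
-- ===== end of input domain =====

-- B replaces the three accumulator loops and the if/elif comparison chain by sum() plus a unique-maximum count over a (total, message) table ("alternative"; same cost).


-- ===== PORT A =====
def obtener_resultado (jugadorA : String) (jugadorB : String) (jugadorC : String) (puntajesA : List Int) (puntajesB : List Int) (puntajesC : List Int) : String :=
  let sumaJugadorA : Int := puntajesA.foldl (fun acc num => acc + num) 0
  let sumaJugadorB : Int := puntajesB.foldl (fun acc num => acc + num) 0
  let sumaJugadorC : Int := puntajesC.foldl (fun acc num => acc + num) 0
  if sumaJugadorA > sumaJugadorB ∧ sumaJugadorA > sumaJugadorC then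
    "Gana jugadorA" ++ jugadorA
  else if sumaJugadorB > sumaJugadorA ∧ sumaJugadorB > sumaJugadorC then
    "Gana jugadorB" ++ jugadorB
  else if sumaJugadorC > sumaJugadorA ∧ sumaJugadorC > sumaJugadorB then
    "Gana jugadorC"
  else
    "Empate"

-- ===== PORT B =====
def obtener_resultado_alt (jugadorA : String) (jugadorB : String) (jugadorC : String) (puntajesA : List Int) (puntajesB : List Int) (puntajesC : List Int) : String :=
  let pares : List (Int × String) :=
    [(puntajesA.sum, "Gana jugadorA" ++ jugadorA),
     (puntajesB.sum, "Gana jugadorB" ++ jugadorB),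
     (puntajesC.sum, "Gana jugadorC")]
  let m : Int := ((pares.map Prod.fst).max?).getD 0
  let ganadores : List String := (pares.filter (fun p => p.1 == m)).map Prod.snd
  if ganadores.length == 1 then ganadores.headI else "Empate"

-- ===== PRECONDITION & SPEC =====
def Spec_obtener_resultado (jugadorA : String) (jugadorB : String) (jugadorC : String) (puntajesA : List Int) (puntajesB : List Int) (puntajesC : List Int) (out : String) : Prop := out = obtener_resultado_alt jugadorA jugadorB jugadorC puntajesA puntajesB puntajesC
instance (jugadorA : String) (jugadorB : String) (jugadorC : String) (puntajesA : List Int) (puntajesB : List Int) (puntajesC : List Int) (out : String) : Decidable (Spec_obtener_resultado jugadorA jugadorB jugadorC puntajesA puntajesB puntajesC out) := by unfold Spec_obtener_resultado; infer_instance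

-- ===== CLAIM (what is proved, stated in full; the proofs are below) =====
def Claim_equal_obtener_resultado : Prop := ∀ (jugadorA : String) (jugadorB : String) (jugadorC : String) (puntajesA : List Int) (puntajesB : List Int) (puntajesC : List Int), Dom_obtener_resultado jugadorA jugadorB jugadorC puntajesA puntajesB puntajesC → Spec_obtener_resultado jugadorA jugadorB jugadorC puntajesA puntajesB puntajesC (obtener_resultado jugadorA jugadorB jugadorC puntajesA puntajesB puntajesC)

-- ===== LEMMAS AND PROOFS =====

-- ===== VERDICT (by name: the statement is the Claim_ definition above) =====
set_option maxHeartbeats 2000000 in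
lemma pv_key (sa sb sc : Int) (ma mb : String) :
    (if sa > sb ∧ sa > sc then ma
     else if sb > sa ∧ sb > sc then mb
     else if sc > sa ∧ sc > sb then "Gana jugadorC"
     else "Empate")
    =
    (let m : Int := (([(sa, ma), (sb, mb), (sc, ("Gana jugadorC" : String))].map Prod.fst).max?).getD 0
     let g := ([(sa, ma), (sb, mb), (sc, ("Gana jugadorC" : String))].filter (fun p => p.1 == m)).map Prod.snd
     if g.length == 1 then g.headI else "Empate") := by
  simp only [List.map_cons, List.map_nil, List.max?_cons, List.max?_nil, List.filter_cons,
    List.filter_nil, Option.getD, beq_iff_eq, Int.max_def, Option.elim]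
  split_ifs <;> first | rfl | omega | simp_all

lemma pv_foldl_sum (l : List Int) : l.foldl (fun acc num => acc + num) 0 = l.sum := by
  simpa using (List.sum_eq_foldl (l := l)).symm

-- ===== VERDICT (by name: the statement is the Claim_ definition above) =====
theorem obtener_resultado_spec : Claim_equal_obtener_resultado := by
  intro jA jB jC pA pB pC _
  show _ = _
  unfold obtener_resultado obtener_resultado_alt
  simp only [pv_foldl_sum]
  exact pv_key pA.sum pB.sum pC.sum ("Gana jugadorA" ++ jA) ("Gana jugadorB" ++ jB)
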